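-- pv_equiv track=rewrite | github.com/Biwane/MyLCprojectTest2 | core/task_scheduler.py | optimize_agent_assignments
-- ===== SOURCE A (Python) =====
-- from typing import Dict, Any, List, Optional, Set, Tuple
--
-- def optimize_agent_assignments(
--
--     subtasks: List[Dict[str, Any]],
--     available_agents: List[str]
-- ) -> List[Dict[str, Any]]:
--     """
--     Optimize agent assignments based on expertise and workload balance.
--
--     Args:
--         subtasks: List of subtask specifications
--         available_agents: List of available agent IDs
--
--     Returns:
--         Updated subtask specifications with optimized agent assignments
--     """
--     # This is a placeholder for a more sophisticated assignment algorithm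
--     # In a real implementation, this would consider agent specialization,
--     # workload balance, etc.
--
--     # Currently just ensures each subtask has an assigned agent
--     agent_workload = {agent: 0 for agent in available_agents}
--
--     for subtask in subtasks:
--         # Skip if already assigned
--         if subtask.get("assigned_agent") in available_agents:
--             agent_workload[subtask["assigned_agent"]] += 1
--             continue
--
--         # Find the agent with the least workload
--         best_agent = min(agent_workload, key=agent_workload.get)
--
--         # Assign agent
--         subtask["assigned_agent"] = best_agent
--
--         # Update workload
--         agent_workload[best_agent] += 1
--
--     return subtasks
-- ===== SOURCE B (Python) =====
-- def optimize_agent_assignments(subtasks, available_agents):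
--     # Lazy priority queue: agents kept in a list sorted by (workload, rank);
--     # stale entries are skipped on pop, new entries placed by binary search,
--     # so there is no per-subtask scan over all agents.
--     order = list(dict.fromkeys(available_agents))
--     rank = {a: i for i, a in enumerate(order)}
--     cur = {a: 0 for a in order}
--     pq = [(0, i, a) for i, a in enumerate(order)]  # already sorted
--     h = 0  # head of the live part of pq
--     for st in subtasks:
--         a = st.get("assigned_agent")
--         if a in rank:
--             cur[a] += 1
--             _pq_add(pq, h, cur[a], rank[a], a)
--         else:
--             # skip stale entries; the first up-to-date one is the least-loaded agent
--             while pq[h][0] != cur[pq[h][2]]: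
--                 h += 1
--             load, r, agent = pq[h]
--             h += 1
--             st["assigned_agent"] = agent
--             cur[agent] += 1
--             _pq_add(pq, h, cur[agent], r, agent)
--     return subtasks
--
--
-- def _pq_add(pq, lo, load, r, agent):
--     # binary search for the insertion point among entries >= lo
--     hi = len(pq)
--     while lo < hi:
--         mid = (lo + hi) // 2
--         if pq[mid][0] < load or (pq[mid][0] == load and pq[mid][1] <= r):
--             lo = mid + 1
--         else:
--             hi = mid
--     pq.insert(lo, (load, r, agent))
-- ===== Notes on version B (the rewrite author's own statement) =====
-- stated objective: faster
-- what changed: B replaces A's per-subtask linear scan over the workload dict (min over all agents) by a lazy priority queue: a list of (workload, rank, agent) entries kept sorted, stale entries skipped at the head and updated entries re-inserted by hand-written binary search, so each subtask costs O(log) comparisons instead of O(m).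
import Mathlib
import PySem

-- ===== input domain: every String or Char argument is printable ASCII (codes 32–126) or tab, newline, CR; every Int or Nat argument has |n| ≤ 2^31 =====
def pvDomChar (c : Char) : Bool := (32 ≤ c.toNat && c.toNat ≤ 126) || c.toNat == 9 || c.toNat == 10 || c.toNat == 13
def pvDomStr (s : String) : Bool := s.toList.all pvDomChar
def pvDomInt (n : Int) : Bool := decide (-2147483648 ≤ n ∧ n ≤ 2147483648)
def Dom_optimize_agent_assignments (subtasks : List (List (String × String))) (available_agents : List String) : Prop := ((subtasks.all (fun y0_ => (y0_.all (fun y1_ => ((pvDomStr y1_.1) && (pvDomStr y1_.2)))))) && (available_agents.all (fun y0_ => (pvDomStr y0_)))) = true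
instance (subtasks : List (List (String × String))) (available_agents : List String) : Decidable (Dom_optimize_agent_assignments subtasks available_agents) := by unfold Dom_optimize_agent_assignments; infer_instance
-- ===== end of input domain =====

-- B replaces A's per-subtask linear min-scan over the workload dict by a lazy sorted
-- priority queue (stale entries skipped, updates re-inserted by binary search): faster.
-- Both Pythons mutate the subtask dicts in place and return the same list; the
-- equivalence proved here is about the RETURN value (both sides mutate identically).


-- ===== PORT A =====

-- d[a] += 1  (key known to be present): A's agent_workload[...] += 1
def pvBumpA (d : PySem.Dict String Int) (a : String) : PySem.Dict String Int :=
  d.insert a (d.getD a 0 + 1)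

-- the assignment branch of A's loop body: best_agent = min(...); subtask[...] = best_agent
def pvAssignA (w : PySem.Dict String Int) (sd : PySem.Dict String String)
    (st : List (String × String)) : PySem.Dict String Int × List (String × String) :=
  match PySem.List.min? w.keys (fun k => w.getD k 0) with
  | some b => (pvBumpA w b, (sd.insert "assigned_agent" b).items)
  | none => (w, st)   -- Python: min() of the empty dict raises ValueError; outside Pre_

def pvStepA (avail : List String) (w : PySem.Dict String Int) (st : List (String × String)) :
    PySem.Dict String Int × List (String × String) :=
  let sd := PySem.Dict.mk st
  match sd.get? "assigned_agent" with
  | some a => if avail.contains a then (pvBumpA w a, st) else pvAssignA w sd st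
  | none => pvAssignA w sd st   -- None is never `in available_agents`

def pvLoopA (avail : List String) (w : PySem.Dict String Int) :
    List (List (String × String)) → List (List (String × String))
  | [] => []
  | st :: rest => (pvStepA avail w st).2 :: pvLoopA avail (pvStepA avail w st).1 rest

def optimize_agent_assignments (subtasks : List (List (String × String)))
    (available_agents : List String) : List (List (String × String)) :=
  pvLoopA available_agents
    (available_agents.foldl (fun d a => d.insert a (0 : Int)) PySem.Dict.empty) subtasks

-- ===== PORT B =====
-- The Lean value `pq` below is the LIVE part pq[h:] of Source B's list (entries before the
-- head pointer h are never read again); _pq_add's lo parameter is therefore always 0 here.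

-- cur[a] += 1: B's counterpart of the bump (same one-line Python statement)
def pvBump (d : PySem.Dict String Int) (a : String) : PySem.Dict String Int :=
  d.insert a (d.getD a 0 + 1)

-- Source B's hand-written binary search for the insertion point (the loop of _pq_add)
def pvPqFind (pq : List (Int × Int × String)) (load r : Int) (lo hi : Nat) : Nat :=
  if _h : lo < hi then
    -- mid = (lo + hi) // 2
    match pq[(lo + hi) / 2]? with
    | some e =>
      if e.1 < load ∨ (e.1 = load ∧ e.2.1 ≤ r) then pvPqFind pq load r ((lo + hi) / 2 + 1) hi
      else pvPqFind pq load r lo ((lo + hi) / 2)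
    | none => lo   -- unreachable: mid < hi ≤ pq.length
  else lo
termination_by hi - lo
decreasing_by all_goals omega

-- _pq_add: insert (load, r, agent) at the found position
def pvPqAdd (pq : List (Int × Int × String)) (load r : Int) (a : String) :
    List (Int × Int × String) :=
  PySem.List.insert pq (pvPqFind pq load r 0 pq.length : Int) (load, r, a)

-- the `while pq[h][0] != cur[pq[h][2]]: h += 1` skip plus taking pq[h]
def pvPopB (cur : PySem.Dict String Int) :
    List (Int × Int × String) → Option ((Int × Int × String) × List (Int × Int × String))
  | [] => none   -- Python: pq[h] raises IndexError; outside Pre_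
  | e :: t => if e.1 = cur.getD e.2.2 0 then some (e, t) else pvPopB cur t

def pvAssignB (cur : PySem.Dict String Int) (pq : List (Int × Int × String))
    (sd : PySem.Dict String String) (st : List (String × String)) :
    PySem.Dict String Int × List (Int × Int × String) × List (String × String) :=
  match pvPopB cur pq with
  | some (e, t) =>
      (pvBump cur e.2.2, pvPqAdd t (cur.getD e.2.2 0 + 1) e.2.1 e.2.2,
       (sd.insert "assigned_agent" e.2.2).items)
  | none => (cur, pq, st)

def pvStepB (rank cur : PySem.Dict String Int) (pq : List (Int × Int × String))
    (st : List (String × String)) :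
    PySem.Dict String Int × List (Int × Int × String) × List (String × String) :=
  let sd := PySem.Dict.mk st
  match sd.get? "assigned_agent" with
  | some a =>
    if rank.contains a then
      (pvBump cur a, pvPqAdd pq (cur.getD a 0 + 1) (rank.getD a 0) a, st)
    else pvAssignB cur pq sd st
  | none => pvAssignB cur pq sd st

def pvLoopB (rank cur : PySem.Dict String Int) (pq : List (Int × Int × String)) :
    List (List (String × String)) → List (List (String × String))
  | [] => []
  | st :: rest =>
      (pvStepB rank cur pq st).2.2 ::
        pvLoopB rank (pvStepB rank cur pq st).1 (pvStepB rank cur pq st).2.1 rest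

def optimize_agent_assignments_alt (subtasks : List (List (String × String)))
    (available_agents : List String) : List (List (String × String)) :=
  let order := PySem.List.dedup available_agents
  pvLoopB
    ((PySem.List.enumerate order 0).foldl (fun d p => d.insert p.2 p.1) PySem.Dict.empty)
    (order.foldl (fun d a => d.insert a (0 : Int)) PySem.Dict.empty)
    ((PySem.List.enumerate order 0).map (fun p => ((0 : Int), p.1, p.2)))
    subtasks

-- ===== PRECONDITION & SPEC =====

-- Pre_ excludes exactly the inputs where Python A raises: with no available agents and at
-- least one subtask, the first subtask reaches min() of an empty dict (ValueError).
def Pre_optimize_agent_assignments (subtasks : List (List (String × String)))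
    (available_agents : List String) : Prop :=
  subtasks = [] ∨ available_agents ≠ []

instance (subtasks : List (List (String × String))) (available_agents : List String) :
    Decidable (Pre_optimize_agent_assignments subtasks available_agents) := by
  unfold Pre_optimize_agent_assignments; infer_instance

def pvWitness_optimize_agent_assignments : (List (List (String × String))) × List String :=
  ([[("title", "t1")], []], ["a1", "a2"])

def Spec_optimize_agent_assignments (subtasks : List (List (String × String)))
    (available_agents : List String) (out : List (List (String × String))) : Prop :=
  out = optimize_agent_assignments_alt subtasks available_agents

instance (subtasks : List (List (String × String))) (available_agents : List String)
    (out : List (List (String × String))) :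
    Decidable (Spec_optimize_agent_assignments subtasks available_agents out) := by
  unfold Spec_optimize_agent_assignments; infer_instance

-- ===== CLAIM (what is proved, stated in full; the proofs are below) =====
def Claim_equal_optimize_agent_assignments : Prop :=
  ∀ (subtasks : List (List (String × String))) (available_agents : List String),
    Dom_optimize_agent_assignments subtasks available_agents →
    Pre_optimize_agent_assignments subtasks available_agents →
    Spec_optimize_agent_assignments subtasks available_agents
      (optimize_agent_assignments subtasks available_agents)

-- ===== LEMMAS AND PROOFS =====

-- lexicographic (load, rank) order on pq entries
def pvLt (e f : Int × Int × String) : Prop := e.1 < f.1 ∨ (e.1 = f.1 ∧ e.2.1 < f.2.1)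

-- "entry sorts at or before position (load, r)": the search condition of _pq_add
def pvLeE (load r : Int) (e : Int × Int × String) : Prop :=
  e.1 < load ∨ (e.1 = load ∧ e.2.1 ≤ r)

-- loop invariant tying A's workload dict to B's lazy priority queue
def pvInv (order : List String) (w : PySem.Dict String Int)
    (pq : List (Int × Int × String)) : Prop :=
  w.keys = order ∧ pq.Pairwise pvLt ∧
  (∀ e ∈ pq, ∃ (k : Nat) (h : k < order.length),
      e.2.1 = (k : Int) ∧ e.2.2 = order[k] ∧ e.1 ≤ w.getD order[k] 0) ∧
  (∀ (k : Nat) (h : k < order.length), (w.getD order[k] 0, (k : Int), order[k]) ∈ pq)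

theorem pvLeE_mono {pq : List (Int × Int × String)} {load r : Int}
    (hp : pq.Pairwise pvLt) {i j : Nat} (hij : i ≤ j) (hj : j < pq.length)
    (h : pvLeE load r pq[j]) : pvLeE load r pq[i] := by
  rcases Nat.lt_or_ge i j with hij2 | hge
  · have hlt := List.pairwise_iff_getElem.1 hp i j (Nat.lt_trans hij2 hj) hj hij2
    unfold pvLt at hlt; unfold pvLeE at *; omega
  · have : i = j := Nat.le_antisymm hij hge
    subst this; exact h

theorem pvLt_left (load r : Int) (a : String) (f : Int × Int × String)
    (h : load < f.1 ∨ (load = f.1 ∧ r < f.2.1)) : pvLt (load, r, a) f := h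

theorem pvLt_right (load r : Int) (a : String) (e : Int × Int × String)
    (h : e.1 < load ∨ (e.1 = load ∧ e.2.1 < r)) : pvLt e (load, r, a) := h

theorem pvLt_mk (a b : Int) (c : String) (d e : Int) (f : String)
    (h : pvLt (a, b, c) (d, e, f)) : a < d ∨ (a = d ∧ b < e) := h

theorem pvFind_spec (pq : List (Int × Int × String)) (load r : Int)
    (hp : pq.Pairwise pvLt) (lo hi : Nat) (h1 : lo ≤ hi) (h2 : hi ≤ pq.length)
    (hlo : ∀ i (_ : i < pq.length), i < lo → pvLeE load r pq[i])
    (hhi : ∀ i (_ : i < pq.length), hi ≤ i → ¬ pvLeE load r pq[i]) :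
    pvPqFind pq load r lo hi ≤ pq.length ∧
    (∀ i (_ : i < pq.length), i < pvPqFind pq load r lo hi → pvLeE load r pq[i]) ∧
    (∀ i (_ : i < pq.length), pvPqFind pq load r lo hi ≤ i → ¬ pvLeE load r pq[i]) := by
  suffices H : ∀ (fuel lo hi : Nat), hi - lo ≤ fuel → lo ≤ hi → hi ≤ pq.length →
      (∀ i (_ : i < pq.length), i < lo → pvLeE load r pq[i]) →
      (∀ i (_ : i < pq.length), hi ≤ i → ¬ pvLeE load r pq[i]) →
      pvPqFind pq load r lo hi ≤ pq.length ∧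
      (∀ i (_ : i < pq.length), i < pvPqFind pq load r lo hi → pvLeE load r pq[i]) ∧
      (∀ i (_ : i < pq.length), pvPqFind pq load r lo hi ≤ i → ¬ pvLeE load r pq[i]) by
    exact H (hi - lo) lo hi le_rfl h1 h2 hlo hhi
  intro fuel
  induction fuel with
  | zero =>
    intro lo hi hf h1 h2 hlo hhi
    have hnlt : ¬ lo < hi := by omega
    have heq : pvPqFind pq load r lo hi = lo := by
      rw [pvPqFind.eq_def, dif_neg hnlt]
    rw [heq]
    exact ⟨by omega, fun i hi2 hilt => hlo i hi2 hilt,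
           fun i hi2 hge => hhi i hi2 (by omega)⟩
  | succ f IH =>
    intro lo hi hf h1 h2 hlo hhi
    by_cases hlt : lo < hi
    · have hmidlt : (lo + hi) / 2 < pq.length := by omega
      by_cases hcond : pq[(lo + hi) / 2].1 < load ∨
          (pq[(lo + hi) / 2].1 = load ∧ pq[(lo + hi) / 2].2.1 ≤ r)
      · have heq : pvPqFind pq load r lo hi = pvPqFind pq load r ((lo + hi) / 2 + 1) hi := by
          rw [pvPqFind.eq_def, dif_pos hlt, List.getElem?_eq_getElem hmidlt]
          show (if pq[(lo + hi) / 2].1 < load ∨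
              (pq[(lo + hi) / 2].1 = load ∧ pq[(lo + hi) / 2].2.1 ≤ r) then
              pvPqFind pq load r ((lo + hi) / 2 + 1) hi
            else pvPqFind pq load r lo ((lo + hi) / 2)) = _
          rw [if_pos hcond]
        rw [heq]
        refine IH ((lo + hi) / 2 + 1) hi (by omega) (by omega) h2 ?_ hhi
        intro i hi2 hilt
        exact pvLeE_mono hp (by omega : i ≤ (lo + hi) / 2) hmidlt hcond
      · have heq : pvPqFind pq load r lo hi = pvPqFind pq load r lo ((lo + hi) / 2) := by
          rw [pvPqFind.eq_def, dif_pos hlt, List.getElem?_eq_getElem hmidlt]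
          show (if pq[(lo + hi) / 2].1 < load ∨
              (pq[(lo + hi) / 2].1 = load ∧ pq[(lo + hi) / 2].2.1 ≤ r) then
              pvPqFind pq load r ((lo + hi) / 2 + 1) hi
            else pvPqFind pq load r lo ((lo + hi) / 2)) = _
          rw [if_neg hcond]
        rw [heq]
        refine IH lo ((lo + hi) / 2) (by omega) (by omega) (by omega) hlo ?_
        intro i hi2 hge hle
        exact hcond (pvLeE_mono hp hge hi2 hle)
    · have heq : pvPqFind pq load r lo hi = lo := by
        rw [pvPqFind.eq_def, dif_neg hlt]
      rw [heq]
      exact ⟨by omega, fun i hi2 hilt => hlo i hi2 hilt,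
             fun i hi2 hge => hhi i hi2 (by omega)⟩

theorem pvInsert_natCast {α : Type} (xs : List α) (j : Nat) (hj : j ≤ xs.length) (v : α) :
    PySem.List.insert xs (j : Int) v = xs.take j ++ v :: xs.drop j := by
  unfold PySem.List.insert PySem.List.sliceIndices
  have h1 : ¬ ((1:Int) < 0) := by norm_num
  have h2 : ¬ ((j:Int) < 0) := by omega
  have h3 : min (j : Int) (xs.length : Int) = (j : Int) := by omega
  simp [h1, h2, h3]

theorem pvAdd_mem (pq : List (Int × Int × String)) (load r : Int) (a : String)
    (hp : pq.Pairwise pvLt) (x : Int × Int × String) :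
    x ∈ pvPqAdd pq load r a ↔ x = (load, r, a) ∨ x ∈ pq := by
  obtain ⟨hjle, hbef, haft⟩ := pvFind_spec pq load r hp 0 pq.length (by omega) le_rfl
    (fun i hi2 h0 => absurd h0 (by omega)) (fun i hi2 hge => absurd hi2 (by omega))
  unfold pvPqAdd
  rw [pvInsert_natCast _ _ hjle]
  constructor
  · intro hx
    rcases List.mem_append.1 hx with h | h
    · exact Or.inr (List.mem_of_mem_take h)
    · rcases List.mem_cons.1 h with rfl | h2
      · exact Or.inl rfl
      · exact Or.inr (List.mem_of_mem_drop h2)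
  · intro hx
    rcases hx with rfl | hx
    · exact List.mem_append.2 (Or.inr (List.mem_cons_self ..))
    · have hx2 : x ∈ pq.take (pvPqFind pq load r 0 pq.length) ++
          pq.drop (pvPqFind pq load r 0 pq.length) := by
        rw [List.take_append_drop]; exact hx
      rcases List.mem_append.1 hx2 with h | h
      · exact List.mem_append.2 (Or.inl h)
      · exact List.mem_append.2 (Or.inr (List.mem_cons_of_mem _ h))

theorem pvAdd_pairwise (pq : List (Int × Int × String)) (load r : Int) (a : String)
    (hp : pq.Pairwise pvLt) (hfresh : ∀ f ∈ pq, ¬(f.1 = load ∧ f.2.1 = r)) :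
    (pvPqAdd pq load r a).Pairwise pvLt := by
  obtain ⟨hjle, hbef, haft⟩ := pvFind_spec pq load r hp 0 pq.length (by omega) le_rfl
    (fun i hi2 h0 => absurd h0 (by omega)) (fun i hi2 hge => absurd hi2 (by omega))
  unfold pvPqAdd
  rw [pvInsert_natCast _ _ hjle]
  rw [List.pairwise_append]
  refine ⟨List.Pairwise.sublist (List.take_sublist _ _) hp, ?_, ?_⟩
  · rw [List.pairwise_cons]
    refine ⟨?_, List.Pairwise.sublist (List.drop_sublist _ _) hp⟩
    intro y hy
    obtain ⟨i, hi2, rfl⟩ := List.mem_iff_getElem.1 hy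
    rw [List.getElem_drop]
    have hlen : pvPqFind pq load r 0 pq.length + i < pq.length := by
      have := List.length_drop (l := pq) (i := pvPqFind pq load r 0 pq.length)
      omega
    have hnot := haft _ hlen (by omega)
    unfold pvLeE at hnot
    exact pvLt_left _ _ _ _ (by omega)
  · intro x hx y hy
    obtain ⟨i, hi2, rfl⟩ := List.mem_take_iff_getElem.1 hx
    have hij : i < pvPqFind pq load r 0 pq.length := by omega
    have hilen : i < pq.length := by omega
    rcases List.mem_cons.1 hy with rfl | hy2
    · have hle := hbef i hilen hij
      have hf := hfresh pq[i] (List.getElem_mem hilen)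
      unfold pvLeE at hle
      exact pvLt_right _ _ _ _ (by omega)
    · obtain ⟨i2, hi22, rfl⟩ := List.mem_iff_getElem.1 hy2
      rw [List.getElem_drop]
      have hlen2 : pvPqFind pq load r 0 pq.length + i2 < pq.length := by
        have := List.length_drop (l := pq) (i := pvPqFind pq load r 0 pq.length)
        omega
      exact List.pairwise_iff_getElem.1 hp i _ hilen hlen2 (by omega)

-- the fold step of Python's min(..., key=...)
def pvMinF (key : String → Int) : Option String → String → Option String :=
  fun acc x => match acc with
    | none => some x
    | some b => if key x < key b then some x else some b

theorem pvMinF_some (key : String → Int) (b x : String) :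
    pvMinF key (some b) x = if key x < key b then some x else some b := rfl

theorem pvMin_eq (key : String → Int) (xs : List String) :
    PySem.List.min? xs key = xs.foldl (pvMinF key) none := by
  unfold PySem.List.min?
  apply List.foldl_ext
  intro acc b _
  cases acc <;> rfl

theorem pvMin_aux (key : String → Int) (t : List String) (m : String) :
    ∃ r, t.foldl (pvMinF key) (some m) = some r ∧
      ((r = m ∧ ∀ y ∈ t, key m ≤ key y) ∨
       ∃ pre suf, t = pre ++ r :: suf ∧ key r < key m ∧
         (∀ y ∈ pre, key r < key y) ∧ (∀ y ∈ suf, key r ≤ key y)) := by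
  induction t generalizing m with
  | nil => exact ⟨m, rfl, Or.inl ⟨rfl, by simp⟩⟩
  | cons y t ih =>
    rw [List.foldl_cons, pvMinF_some]
    by_cases hy : key y < key m
    · rw [if_pos hy]
      obtain ⟨r, hr, hcase⟩ := ih y
      refine ⟨r, hr, Or.inr ?_⟩
      rcases hcase with ⟨rfl, hall⟩ | ⟨pre, suf, hdec, hlt, hpre, hsuf⟩
      · exact ⟨[], t, rfl, hy, by simp, hall⟩
      · refine ⟨y :: pre, suf, by rw [hdec, List.cons_append], lt_trans hlt hy, ?_, hsuf⟩
        intro z hz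
        rcases List.mem_cons.1 hz with rfl | hz2
        · exact hlt
        · exact hpre z hz2
    · rw [if_neg hy]
      rw [not_lt] at hy
      obtain ⟨r, hr, hcase⟩ := ih m
      refine ⟨r, hr, ?_⟩
      rcases hcase with ⟨rfl, hall⟩ | ⟨pre, suf, hdec, hlt, hpre, hsuf⟩
      · refine Or.inl ⟨rfl, ?_⟩
        intro z hz
        rcases List.mem_cons.1 hz with rfl | hz2
        · exact hy
        · exact hall z hz2
      · refine Or.inr ⟨y :: pre, suf, by rw [hdec, List.cons_append], hlt, ?_, hsuf⟩
        intro z hz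
        rcases List.mem_cons.1 hz with rfl | hz2
        · exact lt_of_lt_of_le hlt hy
        · exact hpre z hz2

-- first-minimum characterisation of Python's min(xs, key=...)
theorem pvMin_spec (xs : List String) (key : String → Int) (hne : xs ≠ []) :
    ∃ b pre suf, PySem.List.min? xs key = some b ∧ xs = pre ++ b :: suf ∧
      (∀ y ∈ pre, key b < key y) ∧ (∀ y ∈ suf, key b ≤ key y) := by
  cases xs with
  | nil => exact absurd rfl hne
  | cons x t =>
    have hfold : PySem.List.min? (x :: t) key = t.foldl (pvMinF key) (some x) := by
      rw [pvMin_eq, List.foldl_cons]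
      rfl
    obtain ⟨r, hr, hcase⟩ := pvMin_aux key t x
    rcases hcase with ⟨rfl, hall⟩ | ⟨pre, suf, hdec, hlt, hpre, hsuf⟩
    · exact ⟨r, [], t, by rw [hfold, hr], rfl, by simp, hall⟩
    · refine ⟨r, x :: pre, suf, by rw [hfold, hr], by rw [hdec, List.cons_append], ?_, hsuf⟩
      intro z hz
      rcases List.mem_cons.1 hz with rfl | hz2
      · exact hlt
      · exact hpre z hz2

theorem pvPop_spec (cur : PySem.Dict String Int) (pq : List (Int × Int × String))
    (e : Int × Int × String) (t : List (Int × Int × String))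
    (h : pvPopB cur pq = some (e, t)) :
    ∃ pre, pq = pre ++ e :: t ∧ e.1 = cur.getD e.2.2 0 ∧
      ∀ x ∈ pre, x.1 ≠ cur.getD x.2.2 0 := by
  induction pq with
  | nil => simp [pvPopB] at h
  | cons x t2 ih =>
    unfold pvPopB at h
    split_ifs at h with hx
    · injection h with h2
      obtain ⟨he, ht⟩ := Prod.mk.inj h2
      subst he; subst ht
      exact ⟨[], rfl, hx, by simp⟩
    · obtain ⟨pre, hpq, hv, hpre⟩ := ih h
      exact ⟨x :: pre, by rw [hpq]; rfl, hv, by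
        intro y hy
        rcases List.mem_cons.1 hy with rfl | hy2
        · exact hx
        · exact hpre y hy2⟩

theorem pvPop_isSome (cur : PySem.Dict String Int) (pq : List (Int × Int × String))
    (x : Int × Int × String) (hx : x ∈ pq) (hv : x.1 = cur.getD x.2.2 0) :
    ∃ e t, pvPopB cur pq = some (e, t) := by
  induction pq with
  | nil => simp at hx
  | cons y t2 ih =>
    unfold pvPopB
    split_ifs with hy
    · exact ⟨y, t2, rfl⟩
    · rcases List.mem_cons.1 hx with rfl | hx2
      · exact absurd hv hy
      · exact ih hx2

-- both selections pick the same agent: the first one of minimal workload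
theorem pvSelect_eq (order : List String) (nd : order.Nodup) (w : PySem.Dict String Int)
    (pq : List (Int × Int × String)) (inv : pvInv order w pq) (hne : order ≠ []) :
    ∃ (k : Nat) (hk : k < order.length) (t : List (Int × Int × String)),
      PySem.List.min? order (fun x => w.getD x 0) = some order[k] ∧
      pvPopB w pq = some ((w.getD order[k] 0, (k : Int), order[k]), t) ∧
      t.Pairwise pvLt ∧ (∀ x ∈ t, x ∈ pq) ∧
      (∀ (k' : Nat) (h' : k' < order.length), k' ≠ k →
        (w.getD order[k'] 0, (k' : Int), order[k']) ∈ t) := by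
  obtain ⟨hkeys, hpair, hP2, hP3⟩ := inv
  have hlen0 : 0 < order.length := by
    cases order with
    | nil => exact absurd rfl hne
    | cons _ _ => simp
  obtain ⟨e, t, hpop⟩ := pvPop_isSome w pq (w.getD order[0] 0, (0 : Int), order[0])
    (hP3 0 hlen0) rfl
  obtain ⟨pre, hdec, hval, hpre⟩ := pvPop_spec w pq e t hpop
  have hemem : e ∈ pq := by
    rw [hdec]; exact List.mem_append.2 (Or.inr (List.mem_cons_self ..))
  obtain ⟨ke, hke, he1, he2, he3⟩ := hP2 e hemem
  have heq : e = (w.getD order[ke] 0, (ke : Int), order[ke]) := by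
    rw [← he2, ← hval, ← he1]
  have hint : ∀ (k' : Nat) (h' : k' < order.length), k' ≠ ke →
      (w.getD order[k'] 0, (k' : Int), order[k']) ∈ t := by
    intro k' hk' hkne
    have hm := hP3 k' hk'
    rw [hdec] at hm
    rcases List.mem_append.1 hm with hm1 | hm2
    · exact absurd rfl (hpre _ hm1)
    · rcases List.mem_cons.1 hm2 with hm3 | hm4
      · exfalso
        apply hkne
        have hsnd : ((w.getD order[k'] 0, (k' : Int), order[k'])).2.1 = e.2.1 := by rw [hm3]
        rw [he1] at hsnd
        have hsnd2 : (k' : Int) = (ke : Int) := hsnd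
        exact_mod_cast hsnd2
      · exact hm4
  rw [hdec] at hpair
  have hLt : ∀ x ∈ t, pvLt e x :=
    (List.pairwise_cons.1 (List.pairwise_append.1 hpair).2.1).1
  have htp : t.Pairwise pvLt :=
    (List.pairwise_cons.1 (List.pairwise_append.1 hpair).2.1).2
  have htsub : ∀ x ∈ t, x ∈ pq := by
    intro x hx
    rw [hdec]
    exact List.mem_append.2 (Or.inr (List.mem_cons_of_mem _ hx))
  obtain ⟨b, preA, sufA, hmin, hdecA, hpreA, hsufA⟩ :=
    pvMin_spec order (fun x => w.getD x 0) hne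
  have hlenA : preA.length < order.length := by rw [hdecA]; simp
  have hgetb : order[preA.length]'hlenA = b := by
    rw [List.getElem_of_eq hdecA]
    rw [List.getElem_append_right (Nat.le_refl preA.length)]
    simp
  have hkeq : ke = preA.length := by
    by_contra hne2
    have hein : (w.getD (order[preA.length]'hlenA) 0, (preA.length : Int),
        order[preA.length]'hlenA) ∈ t :=
      hint preA.length hlenA (fun h => hne2 h.symm)
    have hlt2 := hLt _ hein
    rw [heq] at hlt2
    have hlt3 := pvLt_mk _ _ _ _ _ _ hlt2
    rw [hgetb] at hlt3
    have hmema : order[ke] ∈ preA ++ b :: sufA := by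
      rw [← hdecA]; exact List.getElem_mem hke
    rcases List.mem_append.1 hmema with hina | hinb
    · have hstrict := hpreA _ hina
      simp only at hstrict
      omega
    · rcases List.mem_cons.1 hinb with habs | hinsuf
      · exact hne2 ((List.Nodup.getElem_inj_iff nd).1 (habs.trans hgetb.symm))
      · have hle := hsufA _ hinsuf
        simp only at hle
        obtain ⟨i, hi2, hgeti⟩ := List.mem_iff_getElem.1 hinsuf
        have hidx : preA.length + 1 + i < order.length := by
          rw [hdecA]; simp; omega
        have hgeto : order[preA.length + 1 + i]'hidx = order[ke] := by
          rw [List.getElem_of_eq hdecA]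
          rw [List.getElem_append_right (by omega : preA.length ≤ preA.length + 1 + i)]
          simp only [show preA.length + 1 + i - preA.length = i + 1 from by omega,
            List.getElem_cons_succ]
          exact hgeti
        have hkeidx : preA.length + 1 + i = ke := (List.Nodup.getElem_inj_iff nd).1 hgeto
        omega
  subst hkeq
  refine ⟨preA.length, hke, t, ?_, ?_, htp, htsub, hint⟩
  · rw [hmin, ← hgetb]
  · rw [hpop, heq]

-- the invariant survives one bump + re-insert
theorem pvInv_add (order : List String) (nd : order.Nodup) (w : PySem.Dict String Int)
    (k_a : Nat) (hk : k_a < order.length) (X : List (Int × Int × String))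
    (hkeys : w.keys = order) (hXp : X.Pairwise pvLt)
    (hX2 : ∀ e ∈ X, ∃ (k : Nat) (h : k < order.length),
        e.2.1 = (k : Int) ∧ e.2.2 = order[k] ∧ e.1 ≤ w.getD order[k] 0)
    (hX3 : ∀ (k : Nat) (h : k < order.length), k ≠ k_a →
        (w.getD order[k] 0, (k : Int), order[k]) ∈ X) :
    pvInv order (pvBump w order[k_a])
      (pvPqAdd X (w.getD order[k_a] 0 + 1) (k_a : Int) order[k_a]) := by
  have hcont : w.contains order[k_a] = true := by
    rw [PySem.Dict.contains_eq_decide_mem_keys, hkeys]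
    simp [List.getElem_mem]
  have hbkeys : (pvBump w order[k_a]).keys = order := by
    unfold pvBump
    rw [PySem.Dict.keys_insert_of_contains _ _ hcont]
    exact hkeys
  have hload : ∀ (k : Nat) (h : k < order.length),
      (pvBump w order[k_a]).getD order[k] 0
        = if k = k_a then w.getD order[k_a] 0 + 1 else w.getD order[k] 0 := by
    intro k hk2
    unfold pvBump
    rw [PySem.Dict.getD_insert]
    by_cases hkk : k = k_a
    · subst hkk; simp
    · have hne : order[k] ≠ order[k_a] := by
        intro h
        exact hkk ((List.Nodup.getElem_inj_iff nd).1 h)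
      rw [if_neg hne, if_neg hkk]
  have hfresh : ∀ f ∈ X, ¬(f.1 = w.getD order[k_a] 0 + 1 ∧ f.2.1 = (k_a : Int)) := by
    rintro f hf ⟨hf1, hf2⟩
    obtain ⟨k, hk2, hfr, hfa, hfl⟩ := hX2 f hf
    have hkk : k = k_a := by
      have : (k : Int) = (k_a : Int) := by rw [← hfr, hf2]
      exact_mod_cast this
    subst hkk
    omega
  refine ⟨hbkeys, pvAdd_pairwise _ _ _ _ hXp hfresh, ?_, ?_⟩
  · intro e he
    rcases (pvAdd_mem _ _ _ _ hXp e).1 he with rfl | heX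
    · exact ⟨k_a, hk, rfl, rfl, by rw [hload k_a hk, if_pos rfl]⟩
    · obtain ⟨k, hk2, h1, h2, h3⟩ := hX2 e heX
      refine ⟨k, hk2, h1, h2, ?_⟩
      rw [hload k hk2]
      by_cases hkk : k = k_a
      · subst hkk; rw [if_pos rfl]; omega
      · rw [if_neg hkk]; exact h3
  · intro k hk2
    rw [hload k hk2]
    by_cases hkk : k = k_a
    · subst hkk
      rw [if_pos rfl]
      exact (pvAdd_mem _ _ _ _ hXp _).2 (Or.inl rfl)
    · rw [if_neg hkk]
      exact (pvAdd_mem _ _ _ _ hXp _).2 (Or.inr (hX3 k hk2 hkk))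

theorem pvAssign_eq (order : List String) (nd : order.Nodup) (w : PySem.Dict String Int)
    (pq : List (Int × Int × String)) (sd : PySem.Dict String String)
    (st : List (String × String)) (inv : pvInv order w pq) :
    ∃ pq', pvAssignB w pq sd st = ((pvAssignA w sd st).1, pq', (pvAssignA w sd st).2) ∧
      pvInv order (pvAssignA w sd st).1 pq' := by
  by_cases hord : order = []
  · subst hord
    have hpq : pq = [] := by
      cases pq with
      | nil => rfl
      | cons e t =>
        obtain ⟨k, hk, _⟩ := inv.2.2.1 e (List.mem_cons_self ..)
        exact absurd hk (by simp)
    subst hpq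
    have hmin : PySem.List.min? w.keys (fun k => w.getD k 0) = none := by
      rw [inv.1]
      rfl
    have hA : pvAssignA w sd st = (w, st) := by
      unfold pvAssignA
      rw [hmin]
    refine ⟨[], ?_, ?_⟩
    · rw [hA]
      rfl
    · rw [hA]
      exact inv
  · obtain ⟨k, hk, t, hmin, hpop, htp, htsub, ht3⟩ := pvSelect_eq order nd w pq inv hord
    have hminw : PySem.List.min? w.keys (fun x => w.getD x 0) = some order[k] := by
      rw [inv.1]
      exact hmin
    have hA : pvAssignA w sd st
        = (pvBumpA w order[k], (sd.insert "assigned_agent" order[k]).items) := by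
      unfold pvAssignA
      rw [hminw]
    have hB : pvAssignB w pq sd st
        = (pvBump w order[k], pvPqAdd t (w.getD order[k] 0 + 1) (k : Int) order[k],
           (sd.insert "assigned_agent" order[k]).items) := by
      unfold pvAssignB
      rw [hpop]
    refine ⟨pvPqAdd t (w.getD order[k] 0 + 1) (k : Int) order[k], ?_, ?_⟩
    · rw [hA, hB]
      rfl
    · rw [hA]
      exact pvInv_add order nd w k hk t inv.1 htp
        (fun e he => inv.2.2.1 e (htsub e he)) ht3

theorem pvEnum_map_snd {α : Type} (xs : List α) (s : Int) :
    (PySem.List.enumerate xs s).map (·.2) = xs := by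
  induction xs generalizing s with
  | nil => simp [PySem.List.enumerate]
  | cons x t ih => simp [PySem.List.enumerate, ih]

-- rank = {a: i for i, a in enumerate(order)}
theorem pvRank_items (order : List String) (nd : order.Nodup) :
    ((PySem.List.enumerate order 0).foldl (fun d p => d.insert p.2 p.1)
      PySem.Dict.empty).items = (PySem.List.enumerate order 0).map (fun p => (p.2, p.1)) := by
  rw [PySem.Dict.items_foldl_insert_fresh (PySem.List.enumerate order 0)
    (fun p => p.2) (fun p => p.1) PySem.Dict.empty
    (fun a _ => PySem.Dict.contains_empty _)
    (by rw [pvEnum_map_snd]; exact nd)]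
  simp [PySem.Dict.empty]

theorem pvRank_keys (order : List String) (nd : order.Nodup) :
    ((PySem.List.enumerate order 0).foldl (fun d p => d.insert p.2 p.1)
      PySem.Dict.empty).keys = order := by
  simp only [PySem.Dict.keys, pvRank_items order nd, List.map_map]
  exact (List.map_congr_left fun p _ => rfl).trans (pvEnum_map_snd order 0)

theorem pvRank_getD (order : List String) (nd : order.Nodup) (k : Nat)
    (hk : k < order.length) :
    ((PySem.List.enumerate order 0).foldl (fun d p => d.insert p.2 p.1)
      PySem.Dict.empty).getD order[k] 0 = (k : Int) := by
  refine PySem.Dict.getD_of_mem_items _ ?_ ?_ 0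
  · rw [pvRank_items order nd]
    refine List.mem_map.2 ⟨(0 + (k : Int), order[k]), ?_, by simp⟩
    exact (PySem.List.mem_enumerate_iff _ _ _).2 ⟨k, hk, rfl⟩
  · rw [pvRank_keys order nd]; exact nd

-- {a: 0 for a in xs} builds the dedup of xs, all values 0
theorem pvZero_items (xs : List String) (l : List String) :
    (xs.foldl (fun d a => d.insert a (0 : Int)) (PySem.Dict.mk (l.map (fun a => (a, 0))))).items
      = (PySem.Set.update l xs).map (fun a => (a, (0 : Int))) := by
  induction xs generalizing l with
  | nil => simp [PySem.Set.update]
  | cons x t ih =>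
    have hstep : (PySem.Dict.mk (l.map (fun a => (a, (0:Int))))).insert x 0
        = PySem.Dict.mk ((PySem.Set.add l x).map (fun a => (a, (0:Int)))) := by
      apply PySem.Dict.ext
      by_cases hx : x ∈ l
      · have hc : (PySem.Dict.mk (l.map (fun a => (a, (0:Int))))).contains x = true := by
          rw [PySem.Dict.contains_mk, List.any_map]
          simp only [List.any_eq_true, Function.comp_apply, beq_iff_eq]
          exact ⟨x, hx, rfl⟩
        rw [PySem.Dict.items_insert_of_contains _ _ hc]
        have hadd : PySem.Set.add l x = l := by
          unfold PySem.Set.add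
          rw [if_pos]
          simp [PySem.Set.contains, List.contains_eq_mem, hx]
        rw [hadd]
        simp only [List.map_map]
        apply List.map_congr_left
        intro a _
        by_cases hax : a = x
        · subst hax; simp
        · simp [hax]
      · have hc : (PySem.Dict.mk (l.map (fun a => (a, (0:Int))))).contains x = false := by
          rw [PySem.Dict.contains_mk, List.any_map]
          simp only [List.any_eq_false, Function.comp_apply, beq_iff_eq]
          exact fun a ha h => hx (h ▸ ha)
        rw [PySem.Dict.items_insert_of_not_contains _ _ hc]
        have hadd : PySem.Set.add l x = l ++ [x] := by
          unfold PySem.Set.add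
          rw [if_neg]
          simp [PySem.Set.contains, List.contains_eq_mem, hx]
        rw [hadd]
        simp
    rw [List.foldl_cons, hstep, ih]
    rfl

theorem pvUpdate_nodup {α : Type} [BEq α] [LawfulBEq α] (xs s : List α)
    (hd : ∀ x ∈ xs, x ∉ s) (nd : xs.Nodup) : PySem.Set.update s xs = s ++ xs := by
  induction xs generalizing s with
  | nil => simp [PySem.Set.update]
  | cons x t ih =>
    have hx : x ∉ s := hd x (List.mem_cons_self ..)
    have hadd : PySem.Set.add s x = s ++ [x] := by
      unfold PySem.Set.add
      rw [if_neg]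
      simp only [PySem.Set.contains, List.contains_eq_mem, decide_eq_true_eq]
      exact hx
    have hstep : PySem.Set.update s (x :: t) = PySem.Set.update (s ++ [x]) t := by
      simp [PySem.Set.update, hadd]
    rw [hstep, ih]
    · simp
    · intro y hy
      have h1 : y ∉ s := hd y (List.mem_cons_of_mem _ hy)
      have h2 : y ≠ x := by
        intro h; subst h; exact (List.nodup_cons.1 nd).1 hy
      simp [h1, h2]
    · exact (List.nodup_cons.1 nd).2

-- one loop step: B returns A's pair plus a queue that keeps the invariant
theorem pvStep_eq (avail : List String) (order : List String)
    (horder : order = PySem.List.dedup avail) (rank : PySem.Dict String Int)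
    (hrank : rank = (PySem.List.enumerate order 0).foldl (fun d p => d.insert p.2 p.1)
      PySem.Dict.empty)
    (w : PySem.Dict String Int) (pq : List (Int × Int × String))
    (st : List (String × String)) (inv : pvInv order w pq) :
    ∃ pq', pvStepB rank w pq st = ((pvStepA avail w st).1, pq', (pvStepA avail w st).2) ∧
      pvInv order (pvStepA avail w st).1 pq' := by
  have ndo : order.Nodup := by rw [horder]; exact PySem.List.nodup_dedup avail
  have hcont : ∀ a : String, rank.contains a = avail.contains a := by
    intro a
    rw [hrank, PySem.Dict.contains_eq_decide_mem_keys, pvRank_keys order ndo, horder]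
    by_cases ha : a ∈ avail
    · simp [ha]
    · simp [ha]
  unfold pvStepA pvStepB
  rcases hga : (PySem.Dict.mk st).get? "assigned_agent" with _ | a
  · simp only [hga]
    exact pvAssign_eq order ndo w pq _ st inv
  · simp only [hga, hcont a]
    by_cases hac : avail.contains a = true
    · simp only [if_pos hac]
      have hmem : a ∈ order := by
        rw [horder, PySem.List.mem_dedup]
        rw [List.contains_eq_mem, decide_eq_true_eq] at hac
        exact hac
      obtain ⟨k_a, hka, hgeta⟩ := List.mem_iff_getElem.1 hmem
      refine ⟨pvPqAdd pq (w.getD a 0 + 1) (rank.getD a 0) a, rfl, ?_⟩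
      subst hgeta
      rw [hrank, pvRank_getD order ndo k_a hka]
      exact pvInv_add order ndo w k_a hka pq inv.1 inv.2.1 inv.2.2.1
        (fun k hk2 _ => inv.2.2.2 k hk2)
    · simp only [if_neg hac]
      exact pvAssign_eq order ndo w pq _ st inv

theorem pvLoop_eq (avail : List String) (order : List String)
    (horder : order = PySem.List.dedup avail) (rank : PySem.Dict String Int)
    (hrank : rank = (PySem.List.enumerate order 0).foldl (fun d p => d.insert p.2 p.1)
      PySem.Dict.empty)
    (sts : List (List (String × String))) :
    ∀ (w : PySem.Dict String Int) (pq : List (Int × Int × String)), pvInv order w pq →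
      pvLoopA avail w sts = pvLoopB rank w pq sts := by
  induction sts with
  | nil => intro w pq _; rfl
  | cons st rest ih =>
    intro w pq inv
    obtain ⟨pq', hB, hinv⟩ := pvStep_eq avail order horder rank hrank w pq st inv
    unfold pvLoopA pvLoopB
    rw [hB]
    exact congrArg _ (ih (pvStepA avail w st).1 pq' hinv)

theorem pvInv_init (avail : List String) :
    pvInv (PySem.List.dedup avail)
      (avail.foldl (fun d a => d.insert a (0 : Int)) PySem.Dict.empty)
      ((PySem.List.enumerate (PySem.List.dedup avail) 0).map (fun p => ((0 : Int), p.1, p.2))) := by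
  have nd := PySem.List.nodup_dedup avail
  have hitems : (avail.foldl (fun d a => d.insert a (0:Int)) PySem.Dict.empty).items
      = (PySem.List.dedup avail).map (fun a => (a, (0:Int))) := by
    have e1 := pvZero_items avail []
    simp only [List.map_nil] at e1
    have hemp : PySem.Dict.empty = PySem.Dict.mk ([] : List (String × Int)) := rfl
    rw [hemp, e1, PySem.List.dedup_eq_ofList]
    rfl
  have hkeys : (avail.foldl (fun d a => d.insert a (0:Int)) PySem.Dict.empty).keys
      = PySem.List.dedup avail := by
    simp only [PySem.Dict.keys, hitems, List.map_map]
    exact (List.map_congr_left fun a _ => rfl).trans (List.map_id _)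
  have hload : ∀ (k : Nat) (h : k < (PySem.List.dedup avail).length),
      (avail.foldl (fun d a => d.insert a (0:Int)) PySem.Dict.empty).getD
        (PySem.List.dedup avail)[k] 0 = 0 := by
    intro k hk
    refine PySem.Dict.getD_of_mem_items _ ?_ ?_ 0
    · rw [hitems]
      exact List.mem_map_of_mem (List.getElem_mem hk)
    · rw [hkeys]; exact nd
  refine ⟨hkeys, ?_, ?_, ?_⟩
  · refine List.Pairwise.map _ ?_ (PySem.List.pairwise_lt_enumerate _ 0)
    intro p q hpq
    exact Or.inr ⟨rfl, hpq⟩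
  · intro e he
    obtain ⟨p, hp, rfl⟩ := List.mem_map.1 he
    obtain ⟨k, hk, rfl⟩ := (PySem.List.mem_enumerate_iff _ _ _).1 hp
    exact ⟨k, hk, by simp, rfl, (hload k hk).ge⟩
  · intro k hk
    refine List.mem_map.2 ⟨(0 + (k : Int), (PySem.List.dedup avail)[k]), ?_, ?_⟩
    · exact (PySem.List.mem_enumerate_iff _ _ _).2 ⟨k, hk, rfl⟩
    · rw [hload k hk]; norm_num

theorem pvInit_eq (avail : List String) :
    avail.foldl (fun d a => d.insert a (0 : Int)) PySem.Dict.empty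
      = (PySem.List.dedup avail).foldl (fun d a => d.insert a (0 : Int)) PySem.Dict.empty := by
  apply PySem.Dict.ext
  have e1 := pvZero_items avail []
  have e2 := pvZero_items (PySem.List.dedup avail) []
  simp only [List.map_nil] at e1 e2
  have hemp : PySem.Dict.empty = PySem.Dict.mk ([] : List (String × Int)) := rfl
  rw [hemp, e1, e2]
  have h1 : PySem.Set.update [] avail = PySem.List.dedup avail := by
    rw [PySem.List.dedup_eq_ofList]; rfl
  have h2 : PySem.Set.update [] (PySem.List.dedup avail) = PySem.List.dedup avail := by
    rw [pvUpdate_nodup _ _ (by simp) (PySem.List.nodup_dedup avail)]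
    simp
  rw [h1, h2]

-- ===== VERDICT (by name: the statement is the Claim_ definition above) =====
theorem optimize_agent_assignments_spec : Claim_equal_optimize_agent_assignments := by
  unfold Claim_equal_optimize_agent_assignments
  intro subtasks avail _ _
  unfold Spec_optimize_agent_assignments
  unfold optimize_agent_assignments optimize_agent_assignments_alt
  rw [pvInit_eq]
  exact pvLoop_eq avail _ rfl _ rfl subtasks _ _ (by
    have h := pvInv_init avail
    rw [pvInit_eq avail] at h
    exact h)
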